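-- pv_equiv track=rewrite | github.com/Aurelien292/Demo-Day | app/utils/tarification.py | calcul_tarif_post_gratuit
-- ===== SOURCE A (Python) =====
-- def calcul_tarif_post_gratuit(nb: int) -> int:
--     total = 0
--     for i in range(1, nb + 1):
--         if i <= 2:
--             total += 100
--         elif 3 <= i <= 5:
--             total += 70
--         elif i == 6 or i == 9:
--             continue  # gratuit
--         else:
--             total += 50
--     return total
-- ===== SOURCE B (Python) =====
-- def calcul_tarif_post_gratuit(nb: int) -> int:
--     # Closed-form: counts per tier instead of looping.
--     n = max(nb, 0)
--     tier1 = min(n, 2)                      # indices 1..2 at 100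
--     tier2 = min(n, 5) - 2 if n > 2 else 0  # indices 3..5 at 70
--     tier3 = n - 5 if n > 5 else 0          # indices 6..n at 50, minus free 6 and 9
--     free = (1 if n >= 6 else 0) + (1 if n >= 9 else 0)
--     return 100 * tier1 + 70 * tier2 + 50 * (tier3 - free)
-- ===== Notes on version B (the rewrite author's own statement) =====
-- stated objective: faster
-- what changed: Replaced the per-index loop with a closed-form arithmetic count of each price tier (2 at 100, 3 at 70, rest at 50) minus the free indices 6 and 9.
import Mathlib
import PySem

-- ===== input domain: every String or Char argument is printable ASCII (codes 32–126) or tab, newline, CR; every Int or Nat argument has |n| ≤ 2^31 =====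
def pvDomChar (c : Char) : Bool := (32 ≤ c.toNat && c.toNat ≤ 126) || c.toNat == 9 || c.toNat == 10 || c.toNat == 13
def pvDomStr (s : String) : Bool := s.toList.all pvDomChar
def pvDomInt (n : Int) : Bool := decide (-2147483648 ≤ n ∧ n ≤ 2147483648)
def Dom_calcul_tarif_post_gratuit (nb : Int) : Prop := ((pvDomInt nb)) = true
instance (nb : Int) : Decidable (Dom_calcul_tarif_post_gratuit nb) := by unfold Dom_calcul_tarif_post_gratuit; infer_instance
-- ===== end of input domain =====

-- B replaces A's per-index loop by a closed-form count per price tier (faster: O(1) vs O(n)).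

-- ===== PORT A =====
-- step of A's loop body: the if/elif chain on i
def calcTarifStep (total : Int) (i : Int) : Int :=
  if i ≤ 2 then total + 100
  else if 3 ≤ i ∧ i ≤ 5 then total + 70
  else if i = 6 ∨ i = 9 then total  -- continue: gratuit
  else total + 50

def calcul_tarif_post_gratuit (nb : Int) : Int :=
  (PySem.List.pyRange 1 (nb + 1) 1).foldl calcTarifStep 0

-- ===== PORT B =====
def calcul_tarif_post_gratuit_alt (nb : Int) : Int :=
  let n := max nb 0
  let tier1 := min n 2
  let tier2 := if n > 2 then min n 5 - 2 else 0
  let tier3 := if n > 5 then n - 5 else 0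
  let free := (if n ≥ 6 then (1:Int) else 0) + (if n ≥ 9 then (1:Int) else 0)
  100 * tier1 + 70 * tier2 + 50 * (tier3 - free)

-- ===== PRECONDITION & SPEC =====
def Spec_calcul_tarif_post_gratuit (nb : Int) (out : Int) : Prop := out = calcul_tarif_post_gratuit_alt nb
instance (nb : Int) (out : Int) : Decidable (Spec_calcul_tarif_post_gratuit nb out) := by unfold Spec_calcul_tarif_post_gratuit; infer_instance

-- ===== CLAIM (what is proved, stated in full; the proofs are below) =====
def Claim_equal_calcul_tarif_post_gratuit : Prop := ∀ (nb : Int), Dom_calcul_tarif_post_gratuit nb → Spec_calcul_tarif_post_gratuit nb (calcul_tarif_post_gratuit nb)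

-- ===== LEMMAS AND PROOFS =====

theorem calcA_nonpos (nb : Int) (h : nb ≤ 0) : calcul_tarif_post_gratuit nb = 0 := by
  unfold calcul_tarif_post_gratuit
  rw [PySem.List.pyRange_one_eq_nil (by omega)]
  rfl

theorem calcA_succ (n : Nat) :
    calcul_tarif_post_gratuit ((n : Int) + 1)
      = calcTarifStep (calcul_tarif_post_gratuit (n : Int)) ((n : Int) + 1) := by
  unfold calcul_tarif_post_gratuit
  rw [PySem.List.pyRange_one_succ_right (by omega), List.foldl_append]
  rfl

set_option maxHeartbeats 1000000 in
theorem calc_eq_nat (n : Nat) :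
    calcul_tarif_post_gratuit (n : Int) = calcul_tarif_post_gratuit_alt (n : Int) := by
  induction n with
  | zero =>
    rw [show ((0:Nat):Int) = (0:Int) from rfl, calcA_nonpos 0 (by omega)]; rfl
  | succ k ih =>
    have h : ((k : Int) + 1) = ((k + 1 : Nat) : Int) := by push_cast; ring
    rw [← h, calcA_succ k, ih]
    unfold calcul_tarif_post_gratuit_alt calcTarifStep
    dsimp only
    split_ifs <;> omega

-- ===== VERDICT (by name: the statement is the Claim_ definition above) =====
theorem calcul_tarif_post_gratuit_spec : Claim_equal_calcul_tarif_post_gratuit := by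
  intro nb _
  unfold Spec_calcul_tarif_post_gratuit
  by_cases h : nb ≤ 0
  · rw [calcA_nonpos nb h]
    unfold calcul_tarif_post_gratuit_alt
    have : max nb 0 = 0 := by omega
    rw [this]; norm_num
  · have : nb = ((nb.toNat : Nat) : Int) := by omega
    rw [this, calc_eq_nat]
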